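-- pv_equiv track=rewrite | github.com/TomoyaFujita2016/-Two-dimensional_route_searching | explore.py | calcrouteValue
-- ===== SOURCE A (Python) =====
-- def pickMinrouteValue(routeValue, y, x):
--     numbers = []
--     idx = 0
--     if 0 < y:
--         numbers.append(routeValue[y-1][x][2])
--     if 0 < x:
--         numbers.append(routeValue[y][x-1][0])
--     if 0 < x and 0 < y:
--         numbers.append(routeValue[y-1][x-1][1])
--     numbers = [x for x in numbers if x != None]
--     return min(numbers)
--
-- def calcrouteValue(bigMap):
--     routeValue = []
--     for y in range(len(bigMap)):
--         routeValue.append([])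
--         for x in range(len(bigMap[0])):
--             tmpValue = []
--
--             if [x, y] == [0, 0]:
--                 tmpValue.append(bigMap[y][x] + bigMap[y][x + 1])
--                 tmpValue.append(bigMap[y][x] + 2 * bigMap[y + 1][x + 1])
--                 tmpValue.append(bigMap[y][x] + bigMap[y + 1][x])
--             else:
--                 minrouteValue = pickMinrouteValue(routeValue, y, x)
--                 #right
--                 if x != len(bigMap[0])-1:
--                     tmpValue.append(minrouteValue + bigMap[y][x+1])
--                 else:
--                     tmpValue.append(None)
--
--                 # right down
--                 if not(y == len(bigMap)-1 or x == len(bigMap[0])-1):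
--                     tmpValue.append(minrouteValue + 2 * bigMap[y+1][x+1])
--                 else:
--                     tmpValue.append(None)
--
--                 # down
--                 if y != len(bigMap)-1:
--                     tmpValue.append(minrouteValue + bigMap[y+1][x])
--                 else:
--                     tmpValue.append(None)
--
--             routeValue[y].append(tmpValue)
--     return routeValue
-- ===== SOURCE B (Python) =====
-- def minValMatrix(bigMap, H, W):
--     mv = []
--     for y in range(H):
--         row = []
--         for x in range(W):
--             v = bigMap[y][x]
--             if y == 0 and x == 0:
--                 row.append(v)
--             else:
--                 c = []
--                 if y > 0:
--                     c.append(mv[y - 1][x] + v)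
--                 if x > 0:
--                     c.append(row[x - 1] + v)
--                 if y > 0 and x > 0:
--                     c.append(mv[y - 1][x - 1] + 2 * v)
--                 row.append(min(c))
--         mv.append(row)
--     return mv
--
-- def emitCell(bigMap, H, W, m, y, x):
--     if y == 0 and x == 0:
--         return [bigMap[0][0] + bigMap[0][1],
--                 bigMap[0][0] + 2 * bigMap[1][1],
--                 bigMap[0][0] + bigMap[1][0]]
--     return [m + bigMap[y][x + 1] if x != W - 1 else None,
--             m + 2 * bigMap[y + 1][x + 1] if not (y == H - 1 or x == W - 1) else None,
--             m + bigMap[y + 1][x] if y != H - 1 else None]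
--
-- def calcrouteValue(bigMap):
--     H = len(bigMap)
--     W = len(bigMap[0]) if bigMap else 0
--     mv = minValMatrix(bigMap, H, W)
--     return [[emitCell(bigMap, H, W, mv[y][x], y, x) for x in range(W)]
--             for y in range(H)]
-- ===== Notes on version B (the rewrite author's own statement) =====
-- stated objective: simpler
-- what changed: A threads the three-valued (right/diag/down) Option output matrix through the DP and re-reads its entries back via pickMinrouteValue with a None filter; B computes a plain scalar cost-to-reach matrix in one pass and then emits each cell's three values directly from it in a second pass, so the Option re-reading, list-building and None-filtering per cell disappear.
import Mathlib
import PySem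

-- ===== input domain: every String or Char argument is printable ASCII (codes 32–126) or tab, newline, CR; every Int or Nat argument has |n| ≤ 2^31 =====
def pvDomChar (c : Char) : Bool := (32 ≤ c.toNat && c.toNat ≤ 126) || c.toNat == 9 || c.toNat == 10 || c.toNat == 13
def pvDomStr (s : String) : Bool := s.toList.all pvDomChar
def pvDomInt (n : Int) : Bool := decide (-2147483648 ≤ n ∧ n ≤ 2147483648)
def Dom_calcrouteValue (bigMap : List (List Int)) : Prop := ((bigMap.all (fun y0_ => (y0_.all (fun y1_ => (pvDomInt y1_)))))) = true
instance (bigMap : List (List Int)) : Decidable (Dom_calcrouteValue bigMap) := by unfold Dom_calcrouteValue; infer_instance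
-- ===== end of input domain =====

-- B replaces A's DP that threads the three-valued Option output matrix through itself (re-read by
-- pickMinrouteValue with a None filter) by a scalar cost-to-reach matrix computed first, from which
-- a second pass emits each cell's three values; objective: simpler (same O(H·W) cost).

-- ===== PORT A =====

-- bigMap[y][x] / routeValue[y][x][i] with loop-generated non-negative indices; Python raises
-- IndexError out of range — those inputs are exactly the ones excluded by Pre_, so the getD
-- defaults are never semantically relevant inside Pre_.
def pvG (bigMap : List (List Int)) (y x : Nat) : Int := (bigMap.getD y []).getD x 0

def rvGet (rv : List (List (List (Option Int)))) (y x i : Nat) : Option Int :=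
  ((rv.getD y []).getD x []).getD i none

def pickMinrouteValue (routeValue : List (List (List (Option Int)))) (y x : Nat) : Int :=
  let numbers : List (Option Int) :=
    (if 0 < y then [rvGet routeValue (y - 1) x 2] else []) ++
    (if 0 < x then [rvGet routeValue y (x - 1) 0] else []) ++
    (if 0 < x ∧ 0 < y then [rvGet routeValue (y - 1) (x - 1) 1] else [])
  let numbers := numbers.filter (fun v => v != none)
  -- Python min([]) raises ValueError; unreachable on inputs admitted by Pre_ (default is junk).
  ((numbers.filterMap id).min?).getD 0

def aInnerStep (bigMap : List (List Int)) (H W y : Nat)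
    (rv : List (List (List (Option Int)))) (x : Nat) : List (List (List (Option Int))) :=
  let tmpValue : List (Option Int) :=
    if x = 0 ∧ y = 0 then
      [some (pvG bigMap y x + pvG bigMap y (x + 1)),
       some (pvG bigMap y x + 2 * pvG bigMap (y + 1) (x + 1)),
       some (pvG bigMap y x + pvG bigMap (y + 1) x)]
    else
      let minrouteValue := pickMinrouteValue rv y x
      [if x ≠ W - 1 then some (minrouteValue + pvG bigMap y (x + 1)) else none,
       if ¬(y = H - 1 ∨ x = W - 1) then some (minrouteValue + 2 * pvG bigMap (y + 1) (x + 1)) else none,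
       if y ≠ H - 1 then some (minrouteValue + pvG bigMap (y + 1) x) else none]
  rv.set y ((rv.getD y []) ++ [tmpValue])   -- routeValue[y].append(tmpValue)

def aOuterStep (bigMap : List (List Int)) (H W : Nat)
    (rv : List (List (List (Option Int)))) (y : Nat) : List (List (List (Option Int))) :=
  (List.range W).foldl (aInnerStep bigMap H W y) (rv ++ [[]])

def calcrouteValue (bigMap : List (List Int)) : List (List (List (Option Int))) :=
  let H := bigMap.length
  let W := (bigMap.headD []).length   -- len(bigMap[0]); only evaluated by Python when H > 0
  (List.range H).foldl (aOuterStep bigMap H W) []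

-- ===== PORT B =====

def mvStep (bigMap : List (List Int)) (mv : List (List Int)) (y : Nat)
    (row : List Int) (x : Nat) : List Int :=
  let v := pvG bigMap y x
  if y = 0 ∧ x = 0 then row ++ [v]
  else
    let c : List Int :=
      (if 0 < y then [pvG mv (y - 1) x + v] else []) ++
      (if 0 < x then [row.getD (x - 1) 0 + v] else []) ++
      (if 0 < y ∧ 0 < x then [pvG mv (y - 1) (x - 1) + 2 * v] else [])
    row ++ [(c.min?).getD 0]   -- min(c); c is nonempty outside the (0,0) cell

def mvRow (bigMap : List (List Int)) (mv : List (List Int)) (W y : Nat) : List Int :=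
  (List.range W).foldl (mvStep bigMap mv y) []

def minStep (bigMap : List (List Int)) (W : Nat) (mv : List (List Int)) (y : Nat) : List (List Int) :=
  mv ++ [mvRow bigMap mv W y]

def minValMatrix (bigMap : List (List Int)) (H W : Nat) : List (List Int) :=
  (List.range H).foldl (minStep bigMap W) []

def emitCell (bigMap : List (List Int)) (H W : Nat) (m : Int) (y x : Nat) : List (Option Int) :=
  if y = 0 ∧ x = 0 then
    [some (pvG bigMap 0 0 + pvG bigMap 0 1),
     some (pvG bigMap 0 0 + 2 * pvG bigMap 1 1),
     some (pvG bigMap 0 0 + pvG bigMap 1 0)]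
  else
    [if x ≠ W - 1 then some (m + pvG bigMap y (x + 1)) else none,
     if ¬(y = H - 1 ∨ x = W - 1) then some (m + 2 * pvG bigMap (y + 1) (x + 1)) else none,
     if y ≠ H - 1 then some (m + pvG bigMap (y + 1) x) else none]

def calcrouteValue_alt (bigMap : List (List Int)) : List (List (List (Option Int))) :=
  let H := bigMap.length
  let W := if bigMap = [] then 0 else (bigMap.headD []).length   -- len(bigMap[0]) if bigMap else 0
  let mv := minValMatrix bigMap H W
  (List.range H).map (fun y => (List.range W).map (fun x => emitCell bigMap H W (pvG mv y x) y x))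

-- ===== PRECONDITION & SPEC =====

-- Exactly the inputs on which Python A returns without an exception: either a grid with at least
-- 2 rows and 2 columns in which no row is shorter than the first (otherwise some bigMap[..][..]
-- access raises IndexError, e.g. the unconditional bigMap[1][1] read at cell (0,0)), or a grid
-- whose first row is empty / the empty grid, on which the inner loop body never runs.
def Pre_calcrouteValue (bigMap : List (List Int)) : Prop :=
  (2 ≤ bigMap.length ∧ 2 ≤ (bigMap.headD []).length ∧
    ∀ r ∈ bigMap, (bigMap.headD []).length ≤ r.length)
  ∨ (bigMap.headD []).length = 0

instance (bigMap : List (List Int)) : Decidable (Pre_calcrouteValue bigMap) := by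
  unfold Pre_calcrouteValue; infer_instance

def pvWitness_calcrouteValue : List (List Int) := [[1, 2], [3, 4]]

def Spec_calcrouteValue (bigMap : List (List Int)) (out : List (List (List (Option Int)))) : Prop := out = calcrouteValue_alt bigMap
instance (bigMap : List (List Int)) (out : List (List (List (Option Int)))) : Decidable (Spec_calcrouteValue bigMap out) := by unfold Spec_calcrouteValue; infer_instance

-- ===== CLAIM (what is proved, stated in full; the proofs are below) =====
def Claim_equal_calcrouteValue : Prop := ∀ (bigMap : List (List Int)), Dom_calcrouteValue bigMap → Pre_calcrouteValue bigMap → Spec_calcrouteValue bigMap (calcrouteValue bigMap)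

-- ===== LEMMAS AND PROOFS =====

-- The common mathematical DP value of a cell (proof-only; neither port is defined from it).
def mval (bigMap : List (List Int)) (y x : Nat) : Int :=
  if y = 0 ∧ x = 0 then pvG bigMap 0 0
  else
    (((if _h : 0 < y then [mval bigMap (y - 1) x + pvG bigMap y x] else []) ++
      (if _h : 0 < x then [mval bigMap y (x - 1) + pvG bigMap y x] else []) ++
      (if _h : 0 < y ∧ 0 < x then [mval bigMap (y - 1) (x - 1) + 2 * pvG bigMap y x] else [])).min?).getD 0
termination_by y + x
decreasing_by all_goals omega

lemma mval_zero (b : List (List Int)) : mval b 0 0 = pvG b 0 0 := by rw [mval]; simp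

lemma mval_eq_of (b : List (List Int)) (y x : Nat) (h : ¬(y = 0 ∧ x = 0)) :
    mval b y x =
      (((if 0 < y then [mval b (y - 1) x + pvG b y x] else []) ++
        (if 0 < x then [mval b y (x - 1) + pvG b y x] else []) ++
        (if 0 < y ∧ 0 < x then [mval b (y - 1) (x - 1) + 2 * pvG b y x] else [])).min?).getD 0 := by
  rw [mval, if_neg h]; simp [dite_eq_ite]

def pvCell (b : List (List Int)) (H W y x : Nat) : List (Option Int) :=
  emitCell b H W (mval b y x) y x

def pvRows (b : List (List Int)) (H W k : Nat) : List (List (List (Option Int))) :=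
  (List.range k).map (fun y => (List.range W).map (fun x => pvCell b H W y x))

lemma cell_get0 (b : List (List Int)) (H W y x : Nat) (hx : x + 1 < W) :
    (pvCell b H W y x).getD 0 none = some (mval b y x + pvG b y (x + 1)) := by
  unfold pvCell emitCell
  by_cases h : y = 0 ∧ x = 0
  · obtain ⟨hy0, hx0⟩ := h; subst hy0; subst hx0; simp [mval_zero]
  · rw [if_neg h]; rw [if_pos (by omega : x ≠ W - 1)]; simp

lemma cell_get1 (b : List (List Int)) (H W y x : Nat) (hy : y + 1 < H) (hx : x + 1 < W) :
    (pvCell b H W y x).getD 1 none = some (mval b y x + 2 * pvG b (y + 1) (x + 1)) := by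
  unfold pvCell emitCell
  by_cases h : y = 0 ∧ x = 0
  · obtain ⟨hy0, hx0⟩ := h; subst hy0; subst hx0; simp [mval_zero]
  · rw [if_neg h]; rw [if_pos (by omega : ¬(y = H - 1 ∨ x = W - 1))]; simp

lemma cell_get2 (b : List (List Int)) (H W y x : Nat) (hy : y + 1 < H) :
    (pvCell b H W y x).getD 2 none = some (mval b y x + pvG b (y + 1) x) := by
  unfold pvCell emitCell
  by_cases h : y = 0 ∧ x = 0
  · obtain ⟨hy0, hx0⟩ := h; subst hy0; subst hx0; simp [mval_zero]
  · rw [if_neg h]; rw [if_pos (by omega : y ≠ H - 1)]; simp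

lemma rvGet_rows_lt (b : List (List Int)) (H W y j x i : Nat)
    (p : List (List (Option Int))) (hj : j < y) (hx : x < W) :
    rvGet (pvRows b H W y ++ [p]) j x i = (pvCell b H W j x).getD i none := by
  unfold rvGet pvRows
  rw [List.getD_append _ _ _ _ (by simpa using hj)]
  simp [List.getD, hj, hx]

lemma rvGet_rows_self (b : List (List Int)) (H W y x i k : Nat) (hi : i < x) :
    rvGet (pvRows b H W y ++ [(List.range x).map (fun t => pvCell b H W y t)]) y i k
      = (pvCell b H W y i).getD k none := by
  unfold rvGet pvRows
  have h1 : ((List.range y).map (fun y' => (List.range W).map (fun x' => pvCell b H W y' x')) ++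
      [(List.range x).map (fun t => pvCell b H W y t)]).getD y []
      = (List.range x).map (fun t => pvCell b H W y t) := by
    simp [List.getD]
  rw [h1]
  simp [List.getD, hi]

lemma pick_eq (b : List (List Int)) (H W y x : Nat)
    (hy : y < H) (hx : x < W) (hne : ¬(x = 0 ∧ y = 0)) :
    pickMinrouteValue (pvRows b H W y ++ [(List.range x).map (fun t => pvCell b H W y t)]) y x
      = mval b y x := by
  rcases Nat.eq_zero_or_pos y with hy0 | hy0 <;> rcases Nat.eq_zero_or_pos x with hx0 | hx0
  · exact absurd ⟨hx0, hy0⟩ hne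
  · -- y = 0, 0 < x
    subst hy0
    have h0 := rvGet_rows_self b H W 0 (x := x) (x - 1) 0 (by omega)
    have h1 := cell_get0 b H W 0 (x - 1) (by omega)
    simp only [List.getD] at h1
    rw [mval_eq_of b 0 x (by omega)]
    simp [pickMinrouteValue, hx0, h0, h1, List.getD, Nat.sub_add_cancel hx0]
  · -- 0 < y, x = 0
    subst hx0
    have h0 := rvGet_rows_lt b H W y (y - 1) 0 2 ((List.range 0).map (fun t => pvCell b H W y t)) (by omega) hx
    have h1 := cell_get2 b H W (y - 1) 0 (by omega)
    simp only [List.getD] at h1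
    simp only [List.range_zero, List.map_nil] at h0
    rw [mval_eq_of b y 0 (by omega)]
    simp [pickMinrouteValue, hy0, h0, h1, List.getD, Nat.sub_add_cancel hy0]
  · -- 0 < y, 0 < x
    have h0 := rvGet_rows_lt b H W y (y - 1) x 2 ((List.range x).map (fun t => pvCell b H W y t)) (by omega) hx
    have h1 := cell_get2 b H W (y - 1) x (by omega)
    have h2 := rvGet_rows_self b H W y (x := x) (x - 1) 0 (by omega)
    have h3 := cell_get0 b H W y (x - 1) (by omega)
    have h4 := rvGet_rows_lt b H W y (y - 1) (x - 1) 1 ((List.range x).map (fun t => pvCell b H W y t)) (by omega) (by omega)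
    have h5 := cell_get1 b H W (y - 1) (x - 1) (by omega) (by omega)
    simp only [List.getD] at h1 h3 h5
    rw [mval_eq_of b y x (by omega)]
    simp [pickMinrouteValue, hy0, hx0, h0, h1, h2, h3, h4, h5, List.getD,
      Nat.sub_add_cancel hy0, Nat.sub_add_cancel hx0]

lemma aInner (b : List (List Int)) (H W y : Nat) (hy : y < H) :
    ∀ n, n ≤ W →
      (List.range n).foldl (aInnerStep b H W y) (pvRows b H W y ++ [[]])
        = pvRows b H W y ++ [(List.range n).map (fun x => pvCell b H W y x)] := by
  intro n
  induction n with
  | zero => intro _; simp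
  | succ n ih =>
    intro hn
    rw [List.range_succ, List.foldl_append, List.foldl_cons, List.foldl_nil, ih (by omega)]
    have hlen : (pvRows b H W y).length = y := by simp [pvRows]
    have hget : ∀ (l : List (List (List (Option Int)))) p j, j = l.length →
        (l ++ [p]).getD j [] = p := by
      intro l p j h; subst h; simp [List.getD]
    have hset : ∀ (l : List (List (List (Option Int)))) p c j, j = l.length →
        (l ++ [p]).set j c = l ++ [c] := by
      intro l p c j h; subst h; simp [List.set_append]
    have hget' := hget (pvRows b H W y) ((List.range n).map (fun x => pvCell b H W y x)) y hlen.symm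
    have hset' := fun c => hset (pvRows b H W y) ((List.range n).map (fun x => pvCell b H W y x)) c y hlen.symm
    unfold aInnerStep
    by_cases h0 : n = 0 ∧ y = 0
    · obtain ⟨hn0, hy0⟩ := h0
      subst hn0; subst hy0
      rw [if_pos ⟨rfl, rfl⟩, hget', hset']
      simp [pvCell, emitCell]
    · rw [if_neg h0, pick_eq b H W y n hy (by omega) h0, hget', hset']
      have hcell : pvCell b H W y n =
          [if n ≠ W - 1 then some (mval b y n + pvG b y (n + 1)) else none,
           if ¬(y = H - 1 ∨ n = W - 1) then some (mval b y n + 2 * pvG b (y + 1) (n + 1)) else none,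
           if y ≠ H - 1 then some (mval b y n + pvG b (y + 1) n) else none] := by
        unfold pvCell emitCell
        rw [if_neg (by tauto)]
      rw [← hcell]
      simp [List.range_succ]

lemma aOuter (b : List (List Int)) (H W : Nat) :
    ∀ k, k ≤ H → (List.range k).foldl (aOuterStep b H W) [] = pvRows b H W k := by
  intro k
  induction k with
  | zero => intro _; simp [pvRows]
  | succ k ih =>
    intro hk
    rw [List.range_succ, List.foldl_append, List.foldl_cons, List.foldl_nil, ih (by omega)]
    unfold aOuterStep
    rw [aInner b H W k (by omega) W (le_refl W)]
    simp [pvRows, List.range_succ]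

lemma mvRow_spec (b : List (List Int)) (W y : Nat) (mv : List (List Int))
    (hmv : ∀ j, j < y → ∀ i, i < W → pvG mv j i = mval b j i) :
    ∀ n, n ≤ W →
      ((List.range n).foldl (mvStep b mv y) []).length = n ∧
      ∀ i, i < n → ((List.range n).foldl (mvStep b mv y) []).getD i 0 = mval b y i := by
  intro n
  induction n with
  | zero => intro _; exact ⟨rfl, by intro i hi; omega⟩
  | succ n ih =>
    intro hn
    obtain ⟨hl, hv⟩ := ih (by omega)
    rw [List.range_succ, List.foldl_append, List.foldl_cons, List.foldl_nil]
    have key : mvStep b mv y ((List.range n).foldl (mvStep b mv y) []) n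
        = ((List.range n).foldl (mvStep b mv y) []) ++ [mval b y n] := by
      simp only [mvStep]
      by_cases h0 : y = 0 ∧ n = 0
      · obtain ⟨hy0, hn0⟩ := h0; subst hy0; subst hn0
        rw [if_pos ⟨rfl, rfl⟩, mval_zero]
      · rw [if_neg h0]
        congr 1
        rcases Nat.eq_zero_or_pos y with hy0 | hy0 <;> rcases Nat.eq_zero_or_pos n with hn0 | hn0
        · exact absurd ⟨hy0, hn0⟩ h0
        · rw [hv (n - 1) (by omega), mval_eq_of b y n h0]
          simp [hy0, hn0]
        · rw [hmv (y - 1) (by omega) n (by omega), mval_eq_of b y n h0]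
          simp [hy0, hn0]
        · rw [hmv (y - 1) (by omega) n (by omega), hv (n - 1) (by omega),
            hmv (y - 1) (by omega) (n - 1) (by omega), mval_eq_of b y n h0]
    rw [key]
    have glast : ∀ (l : List Int) (v : Int) (j : Nat), j = l.length → (l ++ [v]).getD j 0 = v := by
      intro l v j h; subst h; simp [List.getD]
    refine ⟨by simp [hl], ?_⟩
    intro i hi
    by_cases hin : i < n
    · rw [List.getD_append _ _ _ _ (by omega)]
      exact hv i hin
    · have hieq : i = n := by omega
      subst hieq
      exact glast _ _ _ hl.symm

lemma pass1 (b : List (List Int)) (W : Nat) :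
    ∀ k, ((List.range k).foldl (minStep b W) []).length = k ∧
      ∀ j, j < k → ∀ i, i < W → pvG ((List.range k).foldl (minStep b W) []) j i = mval b j i := by
  intro k
  induction k with
  | zero => exact ⟨rfl, by intro j hj; omega⟩
  | succ k ih =>
    obtain ⟨hl, hv⟩ := ih
    rw [List.range_succ, List.foldl_append, List.foldl_cons, List.foldl_nil]
    obtain ⟨hrl, hrv⟩ := mvRow_spec b W k ((List.range k).foldl (minStep b W) [])
      (fun j hj i hi => hv j hj i hi) W (le_refl W)
    have hrow : mvRow b ((List.range k).foldl (minStep b W) []) W k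
        = (List.range W).foldl (mvStep b ((List.range k).foldl (minStep b W) []) k) [] := rfl
    simp only [minStep, hrow]
    refine ⟨by simp [hl], ?_⟩
    intro j hj i hi
    unfold pvG
    by_cases hjk : j < k
    · rw [List.getD_append _ _ _ _ (by omega)]
      exact hv j hjk i hi
    · have hjeq : j = k := by omega
      subst hjeq
      have glast : ∀ (l : List (List Int)) (p : List Int) (i : Nat), i = l.length →
          (l ++ [p]).getD i [] = p := by
        intro l p i h; subst h; simp [List.getD]
      rw [glast _ _ _ hl.symm]
      exact hrv i hi

lemma emptyW_A (b : List (List Int)) (H : Nat) :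
    ∀ k, (List.range k).foldl (aOuterStep b H 0) [] = List.replicate k [] := by
  intro k
  induction k with
  | zero => simp
  | succ k ih =>
    rw [List.range_succ, List.foldl_append, List.foldl_cons, List.foldl_nil, ih]
    unfold aOuterStep
    rw [List.replicate_succ']
    simp

-- ===== VERDICT (by name: the statement is the Claim_ definition above) =====
theorem calcrouteValue_spec : Claim_equal_calcrouteValue := by
  intro bigMap _ hpre
  unfold Spec_calcrouteValue
  rcases hpre with ⟨hH, hW, _hrows⟩ | hW0
  · have hne : bigMap ≠ [] := by
      intro h; subst h; simp at hH
    obtain ⟨_hPl, hPv⟩ := pass1 bigMap (bigMap.headD []).length bigMap.length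
    unfold calcrouteValue calcrouteValue_alt minValMatrix
    simp only [if_neg hne]
    rw [aOuter bigMap bigMap.length (bigMap.headD []).length bigMap.length (le_refl _)]
    unfold pvRows
    refine List.map_congr_left ?_
    intro y hy
    refine List.map_congr_left ?_
    intro x hx
    rw [List.mem_range] at hy hx
    unfold pvCell
    rw [hPv y hy x hx]
  · unfold calcrouteValue calcrouteValue_alt
    by_cases hb : bigMap = []
    · subst hb; simp
    · simp only [if_neg hb, hW0]
      rw [emptyW_A bigMap bigMap.length bigMap.length]
      simp
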